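-- pv_equiv track=rewrite | github.com/erivanpro/python | Fonctions    Placement optimal des antennes relais.py | MeilleurePosAntenne
-- ===== SOURCE A (Python) =====
-- def MaisonsDansZone(LMaisons,xc,yc) :
--     L = []
--     for M in LMaisons :
--         x,y = M
--         if (x-xc)**2+(y-yc)**2 <= 100**2 :
--             L.append(M)
--     return L
--
-- def MeilleurePosAntenne(LMaisons) :
--     best = 0
--     for x in range(0,500,10) :
--         for y in range(0,500,10) :
--             nb = len(MaisonsDansZone(LMaisons,x,y))
--             if nb > best :
--                 best = nb
--                 bestPos = (x,y)
--     return bestPos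
-- ===== SOURCE B (Python) =====
-- def MeilleurePosAntenne(LMaisons):
--     # Scatter: each house increments the coverage counts of the grid points
--     # within distance 100 of it (only its 10-unit-step window is visited),
--     # stored as a nested dict column -> row -> count; then a single ordered
--     # grid scan picks the first position with the maximal (positive) count,
--     # the same tie-breaking as a full grid scan.
--     counts = {}
--     for hx, hy in LMaisons:
--         lox = max(0, -((100 - hx) // 10))       # ceil((hx-100)/10)
--         hix = min(49, (hx + 100) // 10)
--         loy = max(0, -((100 - hy) // 10))
--         hiy = min(49, (hy + 100) // 10)
--         for i in range(lox, hix + 1):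
--             gx = 10 * i
--             dx2 = (hx - gx) ** 2
--             for j in range(loy, hiy + 1):
--                 gy = 10 * j
--                 if dx2 + (hy - gy) ** 2 <= 10000:
--                     col = counts.get(gx, {})
--                     col[gy] = col.get(gy, 0) + 1
--                     counts[gx] = col
--     best = 0
--     for x in range(0, 500, 10):
--         col = counts.get(x, {})
--         for y in range(0, 500, 10):
--             nb = col.get(y, 0)
--             if nb > best:
--                 best = nb
--                 bestPos = (x, y)
--     return bestPos
-- ===== Notes on version B (the rewrite author's own statement) =====
-- stated objective: faster
-- what changed: Instead of scanning all N houses at each of the 2500 grid points, B makes one pass over the houses scattering each house's coverage onto a dict of grid-point counts (only the house's 21x21 grid window is visited), then a single ordered grid scan picks the first position with the maximal positive count.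
import Mathlib
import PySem

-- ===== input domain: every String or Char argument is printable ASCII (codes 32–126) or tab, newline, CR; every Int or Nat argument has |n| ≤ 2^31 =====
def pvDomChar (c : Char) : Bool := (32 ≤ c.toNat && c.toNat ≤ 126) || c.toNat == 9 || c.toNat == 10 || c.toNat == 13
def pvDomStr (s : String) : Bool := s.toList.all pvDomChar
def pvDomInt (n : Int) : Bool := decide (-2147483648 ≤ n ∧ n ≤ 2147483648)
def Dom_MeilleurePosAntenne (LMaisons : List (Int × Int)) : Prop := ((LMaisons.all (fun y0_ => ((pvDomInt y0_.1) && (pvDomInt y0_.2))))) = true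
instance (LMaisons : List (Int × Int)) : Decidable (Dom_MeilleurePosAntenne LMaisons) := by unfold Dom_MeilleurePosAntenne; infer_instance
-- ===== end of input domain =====

-- B scatters each house's coverage onto a dict of grid-point counts (visiting only the
-- house's 21×21 window) instead of re-scanning all houses at each of the 2500 grid points;
-- objective: faster (constant factor). Return value only; neither version mutates its argument.

-- ===== PORT A =====
def MaisonsDansZone (LMaisons : List (Int × Int)) (xc yc : Int) : List (Int × Int) :=
  LMaisons.foldl
    (fun L M => if (M.1 - xc) ^ 2 + (M.2 - yc) ^ 2 ≤ 100 ^ 2 then L ++ [M] else L) []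

def MeilleurePosAntenne (LMaisons : List (Int × Int)) : Int × Int :=
  ((PySem.List.pyRange 0 500 10).foldl
    (fun st x =>
      (PySem.List.pyRange 0 500 10).foldl
        (fun st y =>
          let nb : Int := ((MaisonsDansZone LMaisons x y).length : Int)
          if nb > st.1 then (nb, some (x, y)) else st)
        st)
    ((0 : Int), (none : Option (Int × Int)))).2.getD (0, 0)

-- ===== PORT B =====
-- per-house scatter: increment the counts (nested dict column -> row -> count)
-- of the grid points inside the house's window
def bHouse (d : PySem.Dict Int (PySem.Dict Int Int)) (M : Int × Int) :
    PySem.Dict Int (PySem.Dict Int Int) :=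
  (PySem.List.pyRange (max 0 (-(PySem.Int.floordiv (100 - M.1) 10)))
      (min 49 (PySem.Int.floordiv (M.1 + 100) 10) + 1) 1).foldl
    (fun d i =>
      (PySem.List.pyRange (max 0 (-(PySem.Int.floordiv (100 - M.2) 10)))
          (min 49 (PySem.Int.floordiv (M.2 + 100) 10) + 1) 1).foldl
        (fun d j =>
          if (M.1 - 10 * i) ^ 2 + (M.2 - 10 * j) ^ 2 ≤ 10000 then
            d.insert (10 * i) ((d.getD (10 * i) PySem.Dict.empty).insert (10 * j)
              ((d.getD (10 * i) PySem.Dict.empty).getD (10 * j) 0 + 1))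
          else d)
        d)
    d

def bCounts (LMaisons : List (Int × Int)) : PySem.Dict Int (PySem.Dict Int Int) :=
  LMaisons.foldl bHouse PySem.Dict.empty

def MeilleurePosAntenne_alt (LMaisons : List (Int × Int)) : Int × Int :=
  let counts := bCounts LMaisons
  ((PySem.List.pyRange 0 500 10).foldl
    (fun st x =>
      let col := counts.getD x PySem.Dict.empty
      (PySem.List.pyRange 0 500 10).foldl
        (fun st y =>
          let nb : Int := col.getD y 0
          if nb > st.1 then (nb, some (x, y)) else st)
        st)
    ((0 : Int), (none : Option (Int × Int)))).2.getD (0, 0)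

-- ===== PRECONDITION & SPEC =====
-- Pre_ excludes exactly the inputs where no 10-step grid point of [0,500)² covers any house:
-- there A's loop never assigns bestPos and the Python raises (NameError/UnboundLocalError).
def Pre_MeilleurePosAntenne (LMaisons : List (Int × Int)) : Prop :=
  ∃ M ∈ LMaisons, ∃ x ∈ PySem.List.pyRange 0 500 10, ∃ y ∈ PySem.List.pyRange 0 500 10,
    (M.1 - x) ^ 2 + (M.2 - y) ^ 2 ≤ 10000
instance (LMaisons : List (Int × Int)) : Decidable (Pre_MeilleurePosAntenne LMaisons) := by
  unfold Pre_MeilleurePosAntenne; infer_instance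

def pvWitness_MeilleurePosAntenne : (List (Int × Int)) := [(0, 0)]

def Spec_MeilleurePosAntenne (LMaisons : List (Int × Int)) (out : Int × Int) : Prop :=
  out = MeilleurePosAntenne_alt LMaisons
instance (LMaisons : List (Int × Int)) (out : Int × Int) : Decidable (Spec_MeilleurePosAntenne LMaisons out) := by
  unfold Spec_MeilleurePosAntenne; infer_instance

-- ===== CLAIM (what is proved, stated in full; the proofs are below) =====
def Claim_equal_MeilleurePosAntenne : Prop := ∀ (LMaisons : List (Int × Int)), Dom_MeilleurePosAntenne LMaisons → Pre_MeilleurePosAntenne LMaisons → Spec_MeilleurePosAntenne LMaisons (MeilleurePosAntenne LMaisons)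

-- ===== LEMMAS AND PROOFS =====

-- conditional counting fold over a nested dict: the count at key (p, q) of the
-- result gains the number of hits at that key
theorem getD2_foldl_ite_insert {α : Type} (l : List α) (k1 k2 : α → Int) (c : α → Prop)
    [DecidablePred c] (d : PySem.Dict Int (PySem.Dict Int Int)) (p q : Int) :
    (((l.foldl (fun d x => if c x then
          d.insert (k1 x) ((d.getD (k1 x) PySem.Dict.empty).insert (k2 x)
            ((d.getD (k1 x) PySem.Dict.empty).getD (k2 x) 0 + 1))
        else d) d).getD p PySem.Dict.empty).getD q 0)
      = ((d.getD p PySem.Dict.empty).getD q 0)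
        + ((l.countP (fun x => decide (c x) && (decide (k1 x = p) && decide (k2 x = q))) : Nat) : Int) := by
  induction l generalizing d with
  | nil => simp
  | cons x l ih =>
    simp only [List.foldl_cons, List.countP_cons]
    by_cases hc : c x
    · rw [if_pos hc, ih, PySem.Dict.getD_insert]
      by_cases h1 : p = k1 x
      · rw [if_pos h1, PySem.Dict.getD_insert]
        subst h1
        by_cases h2 : q = k2 x
        · rw [if_pos h2]; subst h2; simp [hc]; omega
        · rw [if_neg h2]; simp [hc, Ne.symm h2]
      · rw [if_neg h1]
        simp [hc, Ne.symm h1]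
    · rw [if_neg hc, ih]
      simp [hc]

-- a fold whose step adds f a to the projection g adds the sum of f
theorem foldl_proj_add {σ α : Type} (l : List α) (F : σ → α → σ) (g : σ → Int) (f : α → Int)
    (h : ∀ d a, a ∈ l → g (F d a) = g d + f a) (d : σ) :
    g (l.foldl F d) = g d + (l.map f).sum := by
  induction l generalizing d with
  | nil => simp
  | cons a l ih =>
    simp only [List.foldl_cons, List.map_cons, List.sum_cons]
    rw [ih (fun d a ha => h d a (List.mem_cons_of_mem _ ha)), h d a List.mem_cons_self]
    ring

-- countP of a "q j and j = b" predicate on a Nodup list is a 0/1 indicator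
theorem countP_and_eq (l : List Int) (hl : l.Nodup) (q : Int → Prop) [DecidablePred q] (b : Int) :
    l.countP (fun j => decide (q j) && decide (j = b)) = if b ∈ l ∧ q b then 1 else 0 := by
  induction l with
  | nil => simp
  | cons x l ih =>
    simp only [List.countP_cons, List.nodup_cons] at *
    rcases hl with ⟨hx, hl⟩
    by_cases hxb : x = b
    · subst hxb
      have : l.countP (fun j => decide (q j) && decide (j = x)) = 0 := by
        rw [List.countP_eq_zero]
        intro j hj
        simp only [Bool.and_eq_true, decide_eq_true_eq]
        rintro ⟨-, rfl⟩; exact hx hj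
      rw [this]
      by_cases hq : q x <;> simp [hq, hx]
    · rw [ih hl]
      by_cases hb : b ∈ l ∧ q b
      · simp [hxb, Ne.symm hxb, hb]
      · have : ¬ (b ∈ x :: l ∧ q b) := by
          rintro ⟨h1, h2⟩
          rcases List.mem_cons.mp h1 with h1 | h1
          · exact hxb h1.symm
          · exact hb ⟨h1, h2⟩
        simp [hxb, Ne.symm hxb, hb]

-- sum of a single-spike map over a Nodup list
theorem sum_map_single (l : List Int) (hl : l.Nodup) (a v : Int) :
    (l.map (fun i => if i = a then v else 0)).sum = if a ∈ l then v else 0 := by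
  induction l with
  | nil => simp
  | cons x l ih =>
    simp only [List.nodup_cons] at hl
    rcases hl with ⟨hx, hl⟩
    simp only [List.map_cons, List.sum_cons, ih hl]
    by_cases hxa : x = a
    · subst hxa; simp [hx]
    · simp [hxa, Ne.symm hxa]

-- coverage puts the grid index inside the scanned window
theorem mem_window (h a : Int) (ha0 : 0 ≤ a) (ha1 : a ≤ 49) (hd : (h - 10 * a) ^ 2 ≤ 10000) :
    a ∈ PySem.List.pyRange (max 0 (-(PySem.Int.floordiv (100 - h) 10)))
        (min 49 (PySem.Int.floordiv (h + 100) 10) + 1) 1 := by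
  have hb1 : h - 10 * a ≤ 100 := by nlinarith [sq_nonneg (h - 10 * a - 100)]
  have hb2 : -100 ≤ h - 10 * a := by nlinarith [sq_nonneg (h - 10 * a + 100)]
  rw [PySem.List.mem_pyRange_one]
  have hlo : -a ≤ PySem.Int.floordiv (100 - h) 10 := by
    rw [PySem.Int.le_floordiv_iff_mul_le (by norm_num)]; omega
  have hhi : a ≤ PySem.Int.floordiv (h + 100) 10 := by
    rw [PySem.Int.le_floordiv_iff_mul_le (by norm_num)]; omega
  omega

-- one house adds exactly its coverage indicator at each grid point
theorem bHouse_getD (M : Int × Int) (d : PySem.Dict Int (PySem.Dict Int Int)) (a b : Int)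
    (ha0 : 0 ≤ a) (ha1 : a ≤ 49) (hb0 : 0 ≤ b) (hb1 : b ≤ 49) :
    ((bHouse d M).getD (10 * a) PySem.Dict.empty).getD (10 * b) 0
      = ((d.getD (10 * a) PySem.Dict.empty).getD (10 * b) 0)
        + (if (M.1 - 10 * a) ^ 2 + (M.2 - 10 * b) ^ 2 ≤ 10000 then 1 else 0) := by
  have hYnd : (PySem.List.pyRange (max 0 (-(PySem.Int.floordiv (100 - M.2) 10)))
      (min 49 (PySem.Int.floordiv (M.2 + 100) 10) + 1) 1).Nodup :=
    PySem.List.nodup_pyRange_one _ _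
  have hXnd : (PySem.List.pyRange (max 0 (-(PySem.Int.floordiv (100 - M.1) 10)))
      (min 49 (PySem.Int.floordiv (M.1 + 100) 10) + 1) 1).Nodup :=
    PySem.List.nodup_pyRange_one _ _
  calc ((bHouse d M).getD (10 * a) PySem.Dict.empty).getD (10 * b) 0
      = ((d.getD (10 * a) PySem.Dict.empty).getD (10 * b) 0)
        + ((PySem.List.pyRange (max 0 (-(PySem.Int.floordiv (100 - M.1) 10)))
            (min 49 (PySem.Int.floordiv (M.1 + 100) 10) + 1) 1).map
           (fun i => (((PySem.List.pyRange (max 0 (-(PySem.Int.floordiv (100 - M.2) 10)))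
              (min 49 (PySem.Int.floordiv (M.2 + 100) 10) + 1) 1).countP
             (fun j => decide ((M.1 - 10 * i) ^ 2 + (M.2 - 10 * j) ^ 2 ≤ 10000)
               && (decide (10 * i = 10 * a) && decide (10 * j = 10 * b))) : Nat) : Int))).sum := by
        exact foldl_proj_add _ _
          (fun d => (d.getD (10 * a) PySem.Dict.empty).getD (10 * b) 0) _
          (fun d i _ => getD2_foldl_ite_insert _ (fun _ => 10 * i) (fun j => 10 * j)
            (fun j => (M.1 - 10 * i) ^ 2 + (M.2 - 10 * j) ^ 2 ≤ 10000) d (10 * a) (10 * b)) d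
    _ = ((d.getD (10 * a) PySem.Dict.empty).getD (10 * b) 0)
        + ((PySem.List.pyRange (max 0 (-(PySem.Int.floordiv (100 - M.1) 10)))
            (min 49 (PySem.Int.floordiv (M.1 + 100) 10) + 1) 1).map
           (fun i => if i = a
              then (if b ∈ PySem.List.pyRange (max 0 (-(PySem.Int.floordiv (100 - M.2) 10)))
                      (min 49 (PySem.Int.floordiv (M.2 + 100) 10) + 1) 1
                    ∧ (M.1 - 10 * a) ^ 2 + (M.2 - 10 * b) ^ 2 ≤ 10000 then (1 : Int) else 0)
              else 0)).sum := by
        refine congrArg _ (congrArg List.sum ?_)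
        apply List.map_congr_left
        intro i _
        have hP : (PySem.List.pyRange (max 0 (-(PySem.Int.floordiv (100 - M.2) 10)))
              (min 49 (PySem.Int.floordiv (M.2 + 100) 10) + 1) 1).countP
            (fun j => decide ((M.1 - 10 * i) ^ 2 + (M.2 - 10 * j) ^ 2 ≤ 10000)
              && (decide (10 * i = 10 * a) && decide (10 * j = 10 * b)))
            = (PySem.List.pyRange (max 0 (-(PySem.Int.floordiv (100 - M.2) 10)))
              (min 49 (PySem.Int.floordiv (M.2 + 100) 10) + 1) 1).countP
            (fun j => decide (((M.1 - 10 * i) ^ 2 + (M.2 - 10 * j) ^ 2 ≤ 10000 ∧ i = a))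
              && decide (j = b)) := by
          apply List.countP_congr
          intro j _
          have e1 : (10 * i = 10 * a) ↔ i = a := by omega
          have e2 : (10 * j = 10 * b) ↔ j = b := by omega
          by_cases h1 : (M.1 - 10 * i) ^ 2 + (M.2 - 10 * j) ^ 2 ≤ 10000 <;>
            by_cases h2 : i = a <;> by_cases h3 : j = b <;>
            simp [h1, h2, h3, e1, e2]
        rw [hP, countP_and_eq _ hYnd]
        by_cases h2 : i = a
        · subst h2
          simp only [and_true, if_true]
          split_ifs <;> simp
        · simp [h2]
    _ = ((d.getD (10 * a) PySem.Dict.empty).getD (10 * b) 0)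
        + (if a ∈ PySem.List.pyRange (max 0 (-(PySem.Int.floordiv (100 - M.1) 10)))
              (min 49 (PySem.Int.floordiv (M.1 + 100) 10) + 1) 1
           then (if b ∈ PySem.List.pyRange (max 0 (-(PySem.Int.floordiv (100 - M.2) 10)))
                    (min 49 (PySem.Int.floordiv (M.2 + 100) 10) + 1) 1
                 ∧ (M.1 - 10 * a) ^ 2 + (M.2 - 10 * b) ^ 2 ≤ 10000 then (1 : Int) else 0)
           else 0) := by
        rw [sum_map_single _ hXnd]
    _ = ((d.getD (10 * a) PySem.Dict.empty).getD (10 * b) 0)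
        + (if (M.1 - 10 * a) ^ 2 + (M.2 - 10 * b) ^ 2 ≤ 10000 then 1 else 0) := by
        by_cases hc : (M.1 - 10 * a) ^ 2 + (M.2 - 10 * b) ^ 2 ≤ 10000
        · have hax := mem_window M.1 a ha0 ha1 (by nlinarith [sq_nonneg (M.2 - 10 * b)])
          have hby := mem_window M.2 b hb0 hb1 (by nlinarith [sq_nonneg (M.1 - 10 * a)])
          rw [if_pos hax, if_pos (⟨hby, hc⟩ : _ ∧ _), if_pos hc]
        · simp [hc]

-- the scatter counts give, at each grid point, what the zone scan counts
theorem bCounts_getD (L : List (Int × Int)) (a b : Int)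
    (ha0 : 0 ≤ a) (ha1 : a ≤ 49) (hb0 : 0 ≤ b) (hb1 : b ≤ 49) :
    ((bCounts L).getD (10 * a) PySem.Dict.empty).getD (10 * b) 0
      = ((MaisonsDansZone L (10 * a) (10 * b)).length : Int) := by
  unfold bCounts
  rw [foldl_proj_add L bHouse
      (fun d => (d.getD (10 * a) PySem.Dict.empty).getD (10 * b) 0)
      (fun M => if (M.1 - 10 * a) ^ 2 + (M.2 - 10 * b) ^ 2 ≤ 10000 then (1 : Int) else 0)
      (fun d M _ => bHouse_getD M d a b ha0 ha1 hb0 hb1) PySem.Dict.empty]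
  have hlen : MaisonsDansZone L (10 * a) (10 * b)
      = L.filter (fun M => decide ((M.1 - 10 * a) ^ 2 + (M.2 - 10 * b) ^ 2 ≤ 100 ^ 2)) := by
    unfold MaisonsDansZone
    rw [PySem.List.foldl_append_ite_eq_filter]
    simp
  rw [hlen, ← List.countP_eq_length_filter]
  have : (L.map (fun M => if (M.1 - 10 * a) ^ 2 + (M.2 - 10 * b) ^ 2 ≤ 10000 then (1 : Int) else 0))
      = L.map (fun M => if (decide ((M.1 - 10 * a) ^ 2 + (M.2 - 10 * b) ^ 2 ≤ 100 ^ 2)) = true then (1 : Int) else 0) := by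
    apply List.map_congr_left
    intro M _
    norm_num
  rw [this, PySem.List.sum_map_ite_one_zero]
  simp [PySem.Dict.getD]

-- ===== VERDICT (by name: the statement is the Claim_ definition above) =====
theorem MeilleurePosAntenne_spec : Claim_equal_MeilleurePosAntenne := by
  intro L _ _
  unfold Spec_MeilleurePosAntenne MeilleurePosAntenne MeilleurePosAntenne_alt
  have key : ∀ x ∈ PySem.List.pyRange 0 500 10, ∀ y ∈ PySem.List.pyRange 0 500 10,
      ((MaisonsDansZone L x y).length : Int) = ((bCounts L).getD x PySem.Dict.empty).getD y 0 := by
    intro x hx y hy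
    rw [PySem.List.mem_pyRange_iff_of_pos (by norm_num)] at hx hy
    obtain ⟨hx0, hx1, kx, hkx⟩ := hx
    obtain ⟨hy0, hy1, ky, hky⟩ := hy
    have hxv : x = 10 * kx := by omega
    have hyv : y = 10 * ky := by omega
    subst hxv hyv
    rw [bCounts_getD L kx ky (by omega) (by omega) (by omega) (by omega)]
  refine congrArg (fun s : Int × Option (Int × Int) => s.2.getD (0, 0)) ?_
  apply PySem.List.foldl_congr_mem'
  intro x hx st
  apply PySem.List.foldl_congr_mem'
  intro y hy st
  simp only [key x hx y hy]
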